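-- pv_equiv track=rewrite | github.com/GeaninaC26/AI | lab1/main.py | vecini
-- ===== SOURCE A (Python) =====
-- def valid(bin, w, W):
--     weight = 0
--     for i in range(0, len(bin)):
--         if bin[i] == 1:
--             weight = weight + w[i]
--         if weight > W:
--             return False
--     return True
--
-- def vecini(bin,w,W):
--     vec = []
--     for i in range(0, len(bin)):
--         cop = bin[:]
--         if cop[i] == 0:
--             cop[i] = 1
--             if valid(cop,w,W):
--                 vec.append(cop)
--     return vec
-- ===== SOURCE B (Python) =====
-- def vecini(bin, w, W):
--     n = len(bin)
--     # prefix sums of the selected weights (zip truncates; we require len(w) >= len(bin))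
--     pref = []
--     s = 0
--     for b, wi in zip(bin, w):
--         if b == 1:
--             s += wi
--         pref.append(s)
--     # ok[i]: every prefix sum up to index i is <= W
--     ok = []
--     good = True
--     for p in pref:
--         good = good and p <= W
--         ok.append(good)
--     # sufmax[i]: max of pref[i:]
--     sufmax = []
--     m = None
--     for p in reversed(pref):
--         m = p if m is None else max(m, p)
--         sufmax.append(m)
--     sufmax.reverse()
--     vec = []
--     for i, b in enumerate(bin):
--         if b == 0 and (i == 0 or ok[i - 1]) and sufmax[i] + w[i] <= W:
--             vec.append(bin[:i] + [1] + bin[i + 1:])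
--     return vec
-- ===== Notes on version B (the rewrite author's own statement) =====
-- stated objective: faster
-- what changed: Replaces the O(n^2) flip-and-revalidate loop by one O(n) pass: prefix sums of selected weights, prefix-validity flags and a suffix maximum of the prefix sums let each candidate flip be checked in O(1).
-- outside the precondition, e.g. on vecini([2, 0, 0], [5], -1): A returns [], B raises IndexError
import Mathlib
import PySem

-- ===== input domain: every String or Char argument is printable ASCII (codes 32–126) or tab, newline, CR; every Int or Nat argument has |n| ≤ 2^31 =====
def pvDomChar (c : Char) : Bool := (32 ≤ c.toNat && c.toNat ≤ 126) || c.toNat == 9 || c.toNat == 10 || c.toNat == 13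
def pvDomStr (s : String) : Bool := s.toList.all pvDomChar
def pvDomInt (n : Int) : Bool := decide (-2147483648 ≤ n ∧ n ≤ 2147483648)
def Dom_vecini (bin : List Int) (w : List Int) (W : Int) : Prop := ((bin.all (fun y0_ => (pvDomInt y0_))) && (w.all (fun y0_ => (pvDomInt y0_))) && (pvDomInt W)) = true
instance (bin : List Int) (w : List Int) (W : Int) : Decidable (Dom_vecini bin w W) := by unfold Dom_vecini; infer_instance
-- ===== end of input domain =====

-- B replaces A's O(n^2) flip-and-revalidate loop by one O(n) pass (prefix sums,
-- prefix-validity flags and a suffix maximum of the prefix sums); objective: faster.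

-- ===== PORT A =====
-- 'valid' with its early 'return False', as a structural recursion on the index
def validGo (bin w : List Int) (W : Int) (i : Nat) (weight : Int) : Bool :=
  if h : i < bin.length then
    let weight' := if PySem.List.pyGetD bin (i : Int) 0 == 1 then weight + PySem.List.pyGetD w (i : Int) 0 else weight
    if weight' > W then false else validGo bin w W (i + 1) weight'
  else true
termination_by bin.length - i

def valid (bin w : List Int) (W : Int) : Bool := validGo bin w W 0 0

def vecini (bin : List Int) (w : List Int) (W : Int) : List (List Int) :=
  (PySem.List.pyRange 0 (bin.length : Int) 1).foldl (fun vec i =>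
    let cop := bin
    if PySem.List.pyGetD cop i 0 == 0 then
      let cop2 := PySem.List.pySetD cop i 1
      if valid cop2 w W then vec ++ [cop2] else vec
    else vec) []

-- ===== PORT B =====
def vecini_alt (bin : List Int) (w : List Int) (W : Int) : List (List Int) :=
  let pref := ((bin.zip w).foldl (fun (st : List Int × Int) bw =>
      let s := if bw.1 == 1 then st.2 + bw.2 else st.2
      (st.1 ++ [s], s)) ([], 0)).1
  let ok := (pref.foldl (fun (st : List Bool × Bool) p =>
      let g := st.2 && decide (p ≤ W)
      (st.1 ++ [g], g)) ([], true)).1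
  let sufmax := (pref.reverse.foldl (fun (st : Option Int × List Int) p =>
      let m := match st.1 with | none => p | some m0 => max m0 p
      (some m, st.2 ++ [m])) (none, [])).2.reverse
  (PySem.List.enumerate bin 0).foldl (fun vec ib =>
    if ib.2 == 0 && (ib.1 == 0 || PySem.List.pyGetD ok (ib.1 - 1) false)
        && decide (PySem.List.pyGetD sufmax ib.1 0 + PySem.List.pyGetD w ib.1 0 ≤ W) then
      vec ++ [PySem.List.slice bin none (some ib.1) ++ [1] ++ PySem.List.slice bin (some (ib.1 + 1)) none]
    else vec) []

-- ===== PRECONDITION & SPEC =====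
-- Pre_ excludes inputs with w shorter than bin: there A raises IndexError on most inputs and,
-- where an early 'return False' happens to dodge the bad access, its value is an accident of
-- evaluation order that B (which indexes w differently) does not reproduce.
def Pre_vecini (bin : List Int) (w : List Int) (W : Int) : Prop := bin.length ≤ w.length
instance (bin : List Int) (w : List Int) (W : Int) : Decidable (Pre_vecini bin w W) := by unfold Pre_vecini; infer_instance
def pvWitness_vecini : List Int × List Int × Int := ([0, 1, 0], [2, 3, 4], 5)

def Spec_vecini (bin : List Int) (w : List Int) (W : Int) (out : List (List Int)) : Prop := out = vecini_alt bin w W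
instance (bin : List Int) (w : List Int) (W : Int) (out : List (List Int)) : Decidable (Spec_vecini bin w W out) := by unfold Spec_vecini; infer_instance

-- ===== CLAIM (what is proved, stated in full; the proofs are below) =====
def Claim_equal_vecini : Prop := ∀ (bin : List Int) (w : List Int) (W : Int), Dom_vecini bin w W → Pre_vecini bin w W → Spec_vecini bin w W (vecini bin w W)

-- ===== LEMMAS AND PROOFS =====

-- proof-side structural twins of the four loops
def plH (zs : List (Int × Int)) (s : Int) : List Int :=
  match zs with
  | [] => []
  | p :: t => (if p.1 == 1 then s + p.2 else s) :: plH t (if p.1 == 1 then s + p.2 else s)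

def fsH (zs : List (Int × Int)) (s : Int) : Int :=
  match zs with
  | [] => s
  | p :: t => fsH t (if p.1 == 1 then s + p.2 else s)

def vlH (W : Int) (zs : List (Int × Int)) (s : Int) : Bool :=
  match zs with
  | [] => true
  | p :: t =>
    if (if p.1 == 1 then s + p.2 else s) > W then false
    else vlH W t (if p.1 == 1 then s + p.2 else s)

def okH (W : Int) (l : List Int) (g : Bool) : List Bool :=
  match l with
  | [] => []
  | p :: t => (g && decide (p ≤ W)) :: okH W t (g && decide (p ≤ W))

def gH (W : Int) (l : List Int) (g : Bool) : Bool :=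
  match l with
  | [] => g
  | p :: t => gH W t (g && decide (p ≤ W))

def mxO (o : Option Int) (p : Int) : Int := match o with | none => p | some x => max x p

def smH (l : List Int) (m : Option Int) : List Int :=
  match l with
  | [] => []
  | p :: t => mxO m p :: smH t (some (mxO m p))

def gmH (m : Option Int) (l : List Int) : Option Int := l.foldl (fun o q => some (mxO o q)) m

lemma fold_pl (zs : List (Int × Int)) : ∀ (acc : List Int) (s : Int),
    zs.foldl (fun (st : List Int × Int) bw =>
      let s := if bw.1 == 1 then st.2 + bw.2 else st.2
      (st.1 ++ [s], s)) (acc, s) = (acc ++ plH zs s, fsH zs s) := by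
  induction zs with
  | nil => simp [plH, fsH]
  | cons p t ih => intro acc s; simp only [List.foldl_cons, plH, fsH, ih]; simp

lemma fold_ok (W : Int) (l : List Int) : ∀ (acc : List Bool) (g : Bool),
    l.foldl (fun (st : List Bool × Bool) p =>
      let g := st.2 && decide (p ≤ W)
      (st.1 ++ [g], g)) (acc, g) = (acc ++ okH W l g, gH W l g) := by
  induction l with
  | nil => simp [okH, gH]
  | cons p t ih => intro acc g; simp only [List.foldl_cons, okH, gH, ih]; simp

lemma fold_sm (l : List Int) : ∀ (acc : List Int) (m : Option Int),
    l.foldl (fun (st : Option Int × List Int) p =>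
      let m := match st.1 with | none => p | some m0 => max m0 p
      (some m, st.2 ++ [m])) (m, acc) = (gmH m l, acc ++ smH l m) := by
  induction l with
  | nil => simp [smH, gmH]
  | cons p t ih => intro acc m; simp only [List.foldl_cons, smH, gmH, mxO, ih]; cases m <;> simp [gmH]

lemma plH_length (zs : List (Int × Int)) : ∀ s, (plH zs s).length = zs.length := by
  induction zs with
  | nil => simp [plH]
  | cons p t ih => intro s; simp [plH, ih]

lemma okH_length (W : Int) (l : List Int) : ∀ g, (okH W l g).length = l.length := by
  induction l with
  | nil => simp [okH]
  | cons p t ih => intro g; simp [okH, ih]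

lemma smH_length (l : List Int) : ∀ m, (smH l m).length = l.length := by
  induction l with
  | nil => simp [smH]
  | cons p t ih => intro m; simp [smH, ih]

lemma plH_shift (zs : List (Int × Int)) : ∀ s c, plH zs (s + c) = (plH zs s).map (· + c) := by
  induction zs with
  | nil => simp [plH]
  | cons p t ih =>
    intro s c; by_cases h : p.1 == 1
    · simp only [plH, h, if_true]
      have e : s + c + p.2 = (s + p.2) + c := by ring
      rw [e, ih]; simp
    · simp [plH, h, ih]

lemma plH_set (zs : List (Int × Int)) : ∀ (i : Nat) (s c : Int), (hi : i < zs.length) →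
    zs[i].1 ≠ 1 →
    plH (zs.set i (1, c)) s = (plH zs s).take i ++ ((plH zs s).drop i).map (· + c) := by
  induction zs with
  | nil => intro i s c hi; simp at hi
  | cons p t ih =>
    intro i s c hi h0
    cases i with
    | zero =>
      simp only [List.getElem_cons_zero] at h0
      have hp : (p.1 == 1) = false := by simp [h0]
      simp only [List.set_cons_zero, plH, hp]
      simp only [if_false, if_true, List.take_zero, List.drop_zero, List.nil_append]
      simp [List.map_cons, plH_shift]
    | succ i =>
      simp only [List.getElem_cons_succ] at h0
      simp only [List.length_cons, Nat.add_lt_add_iff_right] at hi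
      simp only [List.set_cons_succ, plH, ih i _ c hi h0]
      simp

lemma vlH_iff (W : Int) (zs : List (Int × Int)) : ∀ s, (vlH W zs s = true ↔ ∀ p ∈ plH zs s, p ≤ W) := by
  induction zs with
  | nil => simp [vlH, plH]
  | cons p t ih =>
    intro s
    simp only [vlH, plH, List.mem_cons]
    by_cases h : (if p.1 == 1 then s + p.2 else s) > W
    · simp only [h, if_true]
      constructor
      · intro hf; cases hf
      · intro hall; exfalso; have := hall _ (Or.inl rfl); omega
    · simp only [h, if_false, ih]
      constructor
      · intro hall q hq; rcases hq with rfl | hq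
        · omega
        · exact hall q hq
      · intro hall q hq; exact hall q (Or.inr hq)

lemma okH_getElem (W : Int) (l : List Int) : ∀ (g : Bool) (j : Nat) (h : j < (okH W l g).length),
    (okH W l g)[j] = (g && (l.take (j + 1)).all (fun p => decide (p ≤ W))) := by
  induction l with
  | nil => intro g j h; simp [okH] at h
  | cons p t ih =>
    intro g j h
    cases j with
    | zero => simp [okH]
    | succ j =>
      simp only [okH, List.getElem_cons_succ]
      rw [ih]
      simp [Bool.and_assoc]

lemma smH_getElem (l : List Int) : ∀ (m : Option Int) (j : Nat) (h : j < (smH l m).length),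
    (smH l m)[j] = mxO (gmH m (l.take j)) (l[j]'(by rw [smH_length] at h; exact h)) := by
  induction l with
  | nil => intro m j h; simp [smH] at h
  | cons p t ih =>
    intro m j h
    cases j with
    | zero => simp [smH, gmH]
    | succ j =>
      simp only [smH, List.getElem_cons_succ]
      rw [ih]
      rfl

lemma gmH_some (a : Int) (l : List Int) : gmH (some a) l = some (l.foldl max a) := by
  induction l generalizing a with
  | nil => rfl
  | cons p t ih => simp only [gmH, List.foldl_cons] at *; rw [← ih]; rfl

lemma mxO_gmH_none_le (l : List Int) (q c W : Int) :
    mxO (gmH none l) q + c ≤ W ↔ (q + c ≤ W ∧ ∀ p ∈ l, p + c ≤ W) := by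
  cases l with
  | nil => simp [gmH, mxO]
  | cons p t =>
    have hg : gmH none (p :: t) = some (t.foldl max p) := by
      show gmH (some (mxO none p)) t = _
      simpa [mxO] using gmH_some p t
    rw [hg]
    simp only [mxO, List.mem_cons]
    have h1 := PySem.List.le_foldl_max t p
    have h2 := PySem.List.foldl_max_mem t p
    constructor
    · intro hle
      have hm : max (t.foldl max p) q + c ≤ W := hle
      have hA : t.foldl max p ≤ max (t.foldl max p) q := le_max_left _ _
      have hB : q ≤ max (t.foldl max p) q := le_max_right _ _
      refine ⟨by omega, ?_⟩
      intro x hx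
      rcases hx with rfl | hx
      · have := h1.1; omega
      · have := h1.2 x hx; omega
    · rintro ⟨hq, hall⟩
      have hf : t.foldl max p + c ≤ W := by
        rcases h2 with he | hm
        · rw [he]; exact hall p (Or.inl rfl)
        · exact hall _ (Or.inr hm)
      have hmle : max (t.foldl max p) q ≤ W - c := max_le (by omega) (by omega)
      show max (t.foldl max p) q + c ≤ W
      omega

lemma validGo_eq (bin w : List Int) (W : Int) (hw : bin.length ≤ w.length) :
    ∀ d i s, bin.length - i = d → validGo bin w W i s = vlH W ((bin.zip w).drop i) s := by
  intro d
  induction d with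
  | zero =>
    intro i s hd
    have hi : ¬ i < bin.length := by omega
    rw [validGo]
    simp only [hi, dite_false]
    have : (bin.zip w).drop i = [] := by
      apply List.drop_eq_nil_of_le
      simp; omega
    rw [this]; rfl
  | succ d ih =>
    intro i s hd
    have hi : i < bin.length := by omega
    have hiw : i < w.length := by omega
    have hz : i < (bin.zip w).length := by simp; omega
    have hdrop : (bin.zip w).drop i = (bin[i]'hi, w[i]'hiw) :: (bin.zip w).drop (i+1) := by
      rw [List.drop_eq_getElem_cons hz]
      simp [List.getElem_zip]
    rw [validGo, hdrop]
    simp only [hi, dite_true, vlH]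
    have e1 : PySem.List.pyGetD bin (i : Int) 0 = bin[i]'hi := by
      rw [PySem.List.pyGetD_natCast]; exact List.getD_eq_getElem _ _ hi
    have e2 : PySem.List.pyGetD w (i : Int) 0 = w[i]'hiw := by
      rw [PySem.List.pyGetD_natCast]; exact List.getD_eq_getElem _ _ hiw
    rw [e1, e2]
    by_cases hc : (if bin[i]'hi == 1 then s + w[i]'hiw else s) > W
    · simp only [hc, if_true]
    · simp only [hc, if_false]
      exact ih (i+1) _ (by omega)

lemma zip_set (a b : List Int) (i : Nat) (x : Int) (ha : i < a.length) (hb : i < b.length) :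
    (a.set i x).zip b = (a.zip b).set i (x, b[i]'hb) := by
  apply List.ext_getElem
  · simp
  · intro k h1 h2
    simp only [List.getElem_zip, List.getElem_set]
    by_cases hk : i = k
    · subst hk; simp
    · simp [hk]

lemma key_cond (bin w : List Int) (W : Int) (hw : bin.length ≤ w.length) (k : Nat)
    (hk : k < bin.length) (hb : bin[k] = 0) :
    valid (bin.set k 1) w W =
      ((((k : Int) == (0 : Int)) || PySem.List.pyGetD (okH W (plH (bin.zip w) 0) true) ((k : Int) - 1) false)
        && decide (PySem.List.pyGetD ((smH ((plH (bin.zip w) 0).reverse) none).reverse) ((k : Int)) 0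
                    + PySem.List.pyGetD w (k : Int) 0 ≤ W)) := by
  have hwk : k < w.length := lt_of_lt_of_le hk hw
  have hzl : (bin.zip w).length = bin.length := by rw [List.length_zip]; omega
  have hPl : (plH (bin.zip w) 0).length = bin.length := by rw [plH_length, hzl]
  set P := plH (bin.zip w) 0 with hP
  have hkP : k < P.length := by omega
  have hwgk : PySem.List.pyGetD w ((k : Int)) 0 = w[k] := by
    rw [PySem.List.pyGetD_natCast]; exact List.getD_eq_getElem _ _ hwk
  -- left side
  have hL : (valid (bin.set k 1) w W = true) ↔
      ((∀ p ∈ P.take k, p ≤ W) ∧ ∀ p ∈ P.drop k, p + w[k] ≤ W) := by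
    unfold valid
    rw [validGo_eq (bin.set k 1) w W (by simpa using hw) ((bin.set k 1).length - 0) 0 0 rfl]
    rw [List.drop_zero, zip_set bin w k 1 hk hwk, vlH_iff]
    rw [plH_set (bin.zip w) k 0 (w[k]) (by omega) (by simp [List.getElem_zip, hb])]
    rw [List.forall_mem_append]
    simp only [List.forall_mem_map]
    exact Iff.rfl
  -- right side, suffix-max conjunct
  have hsl : (smH P.reverse none).length = P.length := by
    rw [smH_length, List.length_reverse]
  have hsml : ((smH P.reverse none).reverse).length = P.length := by
    rw [List.length_reverse, hsl]
  have hsm : PySem.List.pyGetD ((smH P.reverse none).reverse) ((k : Int)) 0 =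
      mxO (gmH none ((P.drop (k + 1)).reverse)) (P[k]'hkP) := by
    rw [PySem.List.pyGetD_natCast]
    rw [List.getD_eq_getElem _ _ (by rw [hsml]; omega : k < ((smH P.reverse none).reverse).length)]
    rw [List.getElem_reverse]
    rw [smH_getElem]
    have e1 : P.length - 1 - ((smH P.reverse none).length - 1 - k) = k := by
      rw [hsl]; omega
    have e2 : P.reverse.take ((smH P.reverse none).length - 1 - k) = (P.drop (k + 1)).reverse := by
      have hX : (smH P.reverse none).length - 1 - k = P.length - 1 - k := by rw [hsl]
      rw [hX, List.take_reverse]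
      congr 1
      have hY : P.length - (P.length - 1 - k) = k + 1 := by omega
      rw [hY]
    rw [e2]
    congr 1
    rw [List.getElem_reverse]
    simp only [e1]
  have hz : (decide (PySem.List.pyGetD ((smH P.reverse none).reverse) ((k : Int)) 0
        + PySem.List.pyGetD w ((k : Int)) 0 ≤ W) = true) ↔
      (∀ p ∈ P.drop k, p + w[k] ≤ W) := by
    rw [hsm, hwgk, decide_eq_true_iff]
    rw [mxO_gmH_none_le]
    simp only [List.mem_reverse]
    rw [List.drop_eq_getElem_cons hkP]
    simp only [List.mem_cons]
    constructor
    · rintro ⟨h1, h2⟩ p hp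
      rcases hp with rfl | hp
      · exact h1
      · exact h2 p hp
    · intro h
      exact ⟨h _ (Or.inl rfl), fun p hp => h p (Or.inr hp)⟩
  -- right side, prefix conjunct
  have hocond : ((((k : Int) == (0 : Int)) || PySem.List.pyGetD (okH W P true) ((k : Int) - 1) false) = true) ↔
      (∀ p ∈ P.take k, p ≤ W) := by
    rcases Nat.eq_zero_or_pos k with hk0 | hk0
    · subst hk0; simp
    · have hx : ((k : Int) == (0 : Int)) = false := by
        simp only [beq_eq_false_iff_ne, ne_eq, Int.natCast_eq_zero]; omega
      have hcast : (k : Int) - 1 = ((k - 1 : Nat) : Int) := by omega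
      rw [hx, Bool.false_or, hcast, PySem.List.pyGetD_natCast]
      rw [List.getD_eq_getElem _ _ (by rw [okH_length]; omega : k - 1 < (okH W P true).length)]
      rw [okH_getElem]
      have : k - 1 + 1 = k := by omega
      rw [this]
      simp [List.all_eq_true]
  -- combine
  rw [Bool.eq_iff_iff, hL, Bool.and_eq_true, hocond, hz]
theorem vecini_spec : Claim_equal_vecini := by
  intro bin w W _ hw
  have hw' : bin.length ≤ w.length := hw
  show vecini bin w W = vecini_alt bin w W
  unfold vecini vecini_alt
  simp only [fold_pl, fold_ok, fold_sm, List.nil_append]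
  rw [PySem.List.enumerate_eq_map_pyRange bin (0 : Int)]
  simp only [PySem.List.len_eq]
  rw [PySem.List.pyRange_zero_nat]
  simp only [List.foldl_map]
  apply PySem.List.foldl_congr_mem
  intro acc k hkmem
  have hk : k < bin.length := List.mem_range.mp hkmem
  have hwk : k < w.length := lt_of_lt_of_le hk hw'
  have hbk : PySem.List.pyGetD bin ((k : Int)) 0 = bin[k] := by
    rw [PySem.List.pyGetD_natCast]; exact List.getD_eq_getElem _ _ hk
  simp only [hbk, PySem.List.pySetD_natCast]
  by_cases hb : bin[k] = 0
  · have hcond := key_cond bin w W hw' k hk hb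
    have hitem : List.take k bin ++ (1 : Int) :: PySem.List.slice bin (some ((k : Int) + 1)) none
        = bin.set k 1 := by
      have hc : (k : Int) + 1 = ((k + 1 : Nat) : Int) := by omega
      rw [hc, PySem.List.slice_from_natCast]
      rw [List.set_eq_take_append_cons_drop, if_pos hk]
    simp [hb, hcond]
    rw [hitem]
  · have hbne : (bin[k] == (0 : Int)) = false := by simp [hb]
    simp [hbne]
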